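-- pv_equiv track=rewrite | github.com/anchapin/manamind | src/manamind/core/action.py | _parse_mana_cost
-- ===== SOURCE A (Python) =====
-- from typing import Any, Dict, List, Optional
--
-- def _parse_mana_cost(cost: str) -> Dict[str, int]:
--     """Parse a mana cost string into a dict of mana requirements.
--
--     Args:
--         cost: Mana cost string (e.g., "2RR", "WWU")
--
--     Returns:
--         Dict mapping mana colors to amounts needed
--     """
--     cost = cost.replace("{", "").replace("}", "")
--     mana_dict = {"W": 0, "U": 0, "B": 0, "R": 0, "G": 0, "colorless": 0}
--
--     i = 0
--     while i < len(cost):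
--         char = cost[i]
--         if char.isdigit():
--             # Handle multi-digit numbers
--             number = ""
--             while i < len(cost) and cost[i].isdigit():
--                 number += cost[i]
--                 i += 1
--             mana_dict["colorless"] += int(number)
--         elif char in "WUBRG":
--             mana_dict[char] += 1
--             i += 1
--         else:
--             i += 1
--
--     return mana_dict
-- ===== SOURCE B (Python) =====
-- def _parse_mana_cost(cost: str):
--     """Tokenize-then-fold: group the stripped string into maximal digit runs and
--     single characters, then fold the tokens into the dict (no index/inner-while)."""
--     mana_dict = {"W": 0, "U": 0, "B": 0, "R": 0, "G": 0, "colorless": 0}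
--     tokens = []
--     for ch in cost.replace("{", "").replace("}", ""):
--         if ch.isdigit() and tokens and tokens[-1].isdigit():
--             tokens[-1] += ch
--         else:
--             tokens.append(ch)
--     for tok in tokens:
--         if tok.isdigit():
--             mana_dict["colorless"] += int(tok)
--         elif tok in "WUBRG":
--             mana_dict[tok] += 1
--     return mana_dict
-- ===== Notes on version B (the rewrite author's own statement) =====
-- stated objective: alternative
-- what changed: Replaces A's index-driven while loop with a nested digit-collecting inner while by a two-phase tokenize-then-fold: one direct pass over the string groups it into maximal digit runs and single characters, a second pass folds the tokens into the dict.
import Mathlib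
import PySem

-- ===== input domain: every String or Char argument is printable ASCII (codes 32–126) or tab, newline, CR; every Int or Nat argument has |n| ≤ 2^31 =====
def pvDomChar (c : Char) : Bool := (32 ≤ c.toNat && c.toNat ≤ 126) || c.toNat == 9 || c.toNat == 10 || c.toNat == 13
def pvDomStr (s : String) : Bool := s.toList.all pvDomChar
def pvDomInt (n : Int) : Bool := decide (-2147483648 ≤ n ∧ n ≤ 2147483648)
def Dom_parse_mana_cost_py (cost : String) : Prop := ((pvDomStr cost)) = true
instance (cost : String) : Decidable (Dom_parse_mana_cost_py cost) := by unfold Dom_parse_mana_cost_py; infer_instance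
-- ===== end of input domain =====

-- B replaces A's index loop with a nested digit-collecting while by a tokenize-then-fold
-- decomposition (group maximal digit runs, then fold the tokens into the dict); objective: idiomatic/alternative.

-- ===== PORT A =====
-- the while-loop of A: index scan; the inner `while … isdigit` collects the maximal digit
-- run (takeWhile/dropWhile are that inner while, character by character).
def pvA_loop (d : PySem.Dict String Int) (cs : List Char) : PySem.Dict String Int :=
  match cs with
  | [] => d
  | c :: rest =>
    if PySem.Chars.isdigit c then
      -- number = ""; while i < len and cost[i].isdigit(): number += cost[i]; i += 1
      let num := (c :: rest).takeWhile PySem.Chars.isdigit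
      let rest' := (c :: rest).dropWhile PySem.Chars.isdigit
      -- int(number): num is a nonempty digit run here, so ofChars? is some; getD 0 is exact
      pvA_loop (d.modify "colorless" 0 (· + (PySem.Int.ofChars? num).getD 0)) rest'
    else if PySem.Chars.isIn [c] ['W', 'U', 'B', 'R', 'G'] then
      -- mana_dict[char] += 1 (the key is always present, so modify's default 0 is never used)
      pvA_loop (d.modify (String.ofList [c]) 0 (· + 1)) rest
    else
      pvA_loop d rest
termination_by cs.length
decreasing_by
  · simp only [List.dropWhile_cons, *, if_pos]
    exact Nat.lt_succ_of_le (List.length_dropWhile_le _ _)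
  · simp
  · simp

def parse_mana_cost_py (cost : String) : List (String × Int) :=
  let cs := PySem.Chars.replace (PySem.Chars.replace cost.toList ['{'] []) ['}'] []
  (pvA_loop (PySem.Dict.ofList
      [("W", 0), ("U", 0), ("B", 0), ("R", 0), ("G", 0), ("colorless", 0)]) cs).items

-- ===== PORT B =====
-- tokens[-1] += ch when both ch and the last token are digits, else append [ch]
def pvB_tokStep (toks : List (List Char)) (ch : Char) : List (List Char) :=
  if PySem.Chars.isdigit ch then
    match toks.getLast? with
    | some t =>
        if PySem.Chars.strIsdigit t then toks.dropLast ++ [t ++ [ch]] else toks ++ [[ch]]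
    | none => toks ++ [[ch]]
  else toks ++ [[ch]]

-- one token into the dict; int(tok) on a digit run: ofChars? is some there, getD 0 exact
def pvB_apply (d : PySem.Dict String Int) (tok : List Char) : PySem.Dict String Int :=
  if PySem.Chars.strIsdigit tok then
    d.modify "colorless" 0 (· + (PySem.Int.ofChars? tok).getD 0)
  else if PySem.Chars.isIn tok ['W', 'U', 'B', 'R', 'G'] then
    d.modify (String.ofList tok) 0 (· + 1)
  else d

def parse_mana_cost_py_alt (cost : String) : List (String × Int) :=
  let cs := PySem.Chars.replace (PySem.Chars.replace cost.toList ['{'] []) ['}'] []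
  let toks := cs.foldl pvB_tokStep []
  (toks.foldl pvB_apply (PySem.Dict.ofList
      [("W", 0), ("U", 0), ("B", 0), ("R", 0), ("G", 0), ("colorless", 0)])).items

-- ===== PRECONDITION & SPEC =====
def Spec_parse_mana_cost_py (cost : String) (out : List (String × Int)) : Prop := out = parse_mana_cost_py_alt cost
instance (cost : String) (out : List (String × Int)) : Decidable (Spec_parse_mana_cost_py cost out) := by unfold Spec_parse_mana_cost_py; infer_instance

-- ===== CLAIM (what is proved, stated in full; the proofs are below) =====
def Claim_equal_parse_mana_cost_py : Prop := ∀ (cost : String), Dom_parse_mana_cost_py cost → Spec_parse_mana_cost_py cost (parse_mana_cost_py cost)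

-- ===== LEMMAS AND PROOFS =====

-- reference decomposition of a char list into maximal digit runs / non-digit singletons
def pvGroups (cs : List Char) : List (List Char) :=
  match cs with
  | [] => []
  | c :: rest =>
    if PySem.Chars.isdigit c then
      ((c :: rest).takeWhile PySem.Chars.isdigit) :: pvGroups ((c :: rest).dropWhile PySem.Chars.isdigit)
    else
      [c] :: pvGroups rest
termination_by cs.length
decreasing_by
  · simp only [List.dropWhile_cons, *, if_pos]
    exact Nat.lt_succ_of_le (List.length_dropWhile_le _ _)
  · simp

-- A's loop is the fold of pvB_apply over the digit-run decomposition
-- head of a dropWhile never satisfies the predicate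
lemma pvHead_dropWhile {p : Char → Bool} {l : List Char} {c : Char}
    (h : (l.dropWhile p).head? = some c) : p c = false := by
  induction l with
  | nil => simp at h
  | cons a l ih =>
    rw [List.dropWhile_cons] at h
    split at h
    · exact ih h
    · simp_all

lemma pvA_loop_eq_groups (d : PySem.Dict String Int) (cs : List Char) :
    pvA_loop d cs = (pvGroups cs).foldl pvB_apply d := by
  induction d, cs using pvA_loop.induct with
  | case1 d => simp [pvA_loop, pvGroups]
  | case2 d c rest hdig num rest' ih =>
    rw [pvA_loop, pvGroups]
    simp only [if_pos hdig, List.foldl_cons]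
    rw [ih]
    congr 1
    have hnum : PySem.Chars.strIsdigit ((c :: rest).takeWhile PySem.Chars.isdigit) = true := by
      rw [List.takeWhile_cons, if_pos hdig]
      simp only [PySem.Chars.strIsdigit, List.isEmpty_cons, Bool.not_false, Bool.true_and,
        List.all_cons, List.all_eq_true, Bool.and_eq_true]
      exact ⟨hdig, fun x hx => List.mem_takeWhile_imp hx⟩
    rw [pvB_apply, if_pos hnum]
  | case3 d c rest hdig hcol ih =>
    rw [pvA_loop, pvGroups]
    simp only [if_neg hdig, if_pos hcol, List.foldl_cons]
    rw [ih]
    congr 1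
    have h1 : PySem.Chars.strIsdigit [c] = false := by
      simp [PySem.Chars.strIsdigit, hdig]
    simp only [pvB_apply, h1, hcol, Bool.false_eq_true, if_false, if_true]

  | case4 d c rest hdig hcol ih =>
    rw [pvA_loop, pvGroups]
    simp only [if_neg hdig, List.foldl_cons]
    rw [ih]
    have h1 : PySem.Chars.strIsdigit [c] = false := by
      simp [PySem.Chars.strIsdigit, hdig]
    rw [Bool.not_eq_true] at hcol
    simp only [pvB_apply, h1, hcol, Bool.false_eq_true, if_false]

-- folding the tokenizer over an all-digit suffix merges into the last (digit) token
lemma pvTok_run (ds : List Char) (hds : ∀ c ∈ ds, PySem.Chars.isdigit c = true)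
    (acc : List (List Char)) (t : List Char) (ht : PySem.Chars.strIsdigit t = true) :
    ds.foldl pvB_tokStep (acc ++ [t]) = acc ++ [t ++ ds] := by
  induction ds generalizing acc t with
  | nil => simp
  | cons d ds ih =>
    have hd : PySem.Chars.isdigit d = true := hds d (by simp)
    rw [List.foldl_cons, pvB_tokStep, if_pos hd, List.getLast?_concat]
    simp only [if_pos ht, List.dropLast_concat]
    have hds' : ∀ x ∈ ds, PySem.Chars.isdigit x = true :=
      fun x hx => hds x (List.mem_cons_of_mem _ hx)
    have ht' : PySem.Chars.strIsdigit (t ++ [d]) = true := by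
      simp only [PySem.Chars.strIsdigit, Bool.and_eq_true, Bool.not_eq_eq_eq_not, Bool.not_true,
        List.all_eq_true] at ht ⊢
      refine ⟨by simp, fun x hx => ?_⟩
      rcases List.mem_append.mp hx with h | h
      · exact ht.2 x h
      · simp only [List.mem_singleton] at h; subst h; exact hd
    rw [ih hds' acc (t ++ [d]) ht']
    simp

-- the tokenizer computes exactly the digit-run decomposition (fuel-indexed strong induction)
lemma pvTok_aux (n : Nat) : ∀ (cs : List Char) (acc : List (List Char)), cs.length ≤ n →
    (acc = [] ∨ (∃ t, acc.getLast? = some t ∧ PySem.Chars.strIsdigit t = false) ∨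
     (∀ c, cs.head? = some c → PySem.Chars.isdigit c = false)) →
    cs.foldl pvB_tokStep acc = acc ++ pvGroups cs := by
  induction n with
  | zero =>
    intro cs acc hle _
    have : cs = [] := List.length_eq_zero_iff.mp (Nat.le_zero.mp hle)
    subst this; simp [pvGroups]
  | succ n ih =>
    intro cs acc hle h
    match cs with
    | [] => simp [pvGroups]
    | c :: rest =>
      by_cases hdig : PySem.Chars.isdigit c = true
      · have hstep : pvB_tokStep acc c = acc ++ [[c]] := by
          rcases h with rfl | ⟨t, hlast, hfalse⟩ | hhead
          · simp [pvB_tokStep, hdig]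
          · rw [pvB_tokStep, if_pos hdig, hlast]
            simp only [hfalse, Bool.false_eq_true, if_false]
          · exact absurd hdig (by simp [hhead c rfl])
        have hsplit := List.takeWhile_append_dropWhile (p := PySem.Chars.isdigit) (l := rest)
        have hrun : rest.foldl pvB_tokStep (acc ++ [[c]]) =
            (rest.dropWhile PySem.Chars.isdigit).foldl pvB_tokStep
              (acc ++ [[c] ++ rest.takeWhile PySem.Chars.isdigit]) := by
          conv_lhs => rw [← hsplit]
          rw [List.foldl_append,
            pvTok_run _ (fun x hx => List.mem_takeWhile_imp hx) acc [c]
              (by simp [PySem.Chars.strIsdigit, hdig])]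
        have hlen : (rest.dropWhile PySem.Chars.isdigit).length ≤ n := by
          have h1 := List.length_dropWhile_le PySem.Chars.isdigit rest
          simp only [List.length_cons] at hle
          omega
        rw [List.foldl_cons, hstep, hrun,
          ih _ _ hlen (Or.inr (Or.inr (fun x hx => pvHead_dropWhile hx)))]
        rw [pvGroups, if_pos hdig]
        simp [hdig]
      · have hstep : pvB_tokStep acc c = acc ++ [[c]] := by rw [pvB_tokStep, if_neg hdig]
        rw [Bool.not_eq_true] at hdig
        rw [List.foldl_cons, hstep,
          ih rest (acc ++ [[c]]) (by simp only [List.length_cons] at hle; omega)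
            (Or.inr (Or.inl ⟨[c], List.getLast?_concat, by simp [PySem.Chars.strIsdigit, hdig]⟩))]
        rw [pvGroups]
        simp only [hdig, Bool.false_eq_true, if_false]
        simp

lemma pvTok_eq_groups (cs : List Char) (acc : List (List Char))
    (h : acc = [] ∨ (∃ t, acc.getLast? = some t ∧ PySem.Chars.strIsdigit t = false) ∨
         (∀ c, cs.head? = some c → PySem.Chars.isdigit c = false)) :
    cs.foldl pvB_tokStep acc = acc ++ pvGroups cs :=
  pvTok_aux cs.length cs acc (Nat.le_refl _) h

-- ===== VERDICT (by name: the statement is the Claim_ definition above) =====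
theorem parse_mana_cost_py_spec : Claim_equal_parse_mana_cost_py := by
  intro cost _
  show parse_mana_cost_py cost = parse_mana_cost_py_alt cost
  simp only [parse_mana_cost_py, parse_mana_cost_py_alt]
  rw [pvTok_eq_groups _ _ (Or.inl rfl), pvA_loop_eq_groups]
  rfl
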